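-- pv_equiv track=rewrite | github.com/kostyamorales/wildberries_helper_bot | utils.py | get_text_with_items
-- ===== SOURCE A (Python) =====
-- def get_text_with_items(items):
--     """ Преобразуем товары исходя из информации о них в текстовые сообщения
--         Возвращаем список этих сообщений
--     """
--     items_text = []
--     for item_id, article, item_size, item_name, url, existence, user_price in items:
--         if existence:
--             # размеры могут иметь буквенное обозначение, поэтому поле в БД TEXT
--             # Приходится отсеивать товары без размера, сравнивая со строкой
--             if item_size != '0':
--                 items_text.append(
--                     "Отслеживание цены:\n"
--                     f"[{item_name}]({url})\n"
--                     f"Артикул: {article}\n"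
--                     f"Размер: {item_size}\n"
--                     f"Ожидаемая цена: {user_price}\n"
--                     f"ID товара: {item_id}\n"
--                 )
--                 continue
--             items_text.append(
--                 "Отслеживание цены:\n"
--                 f"[{item_name}]({url})\n"
--                 f"Артикул: {article}\n"
--                 f"Ожидаемая цена: {user_price}\n"
--                 f"ID товара: {item_id}\n"
--             )
--             continue
--         # размеры могут иметь буквенное обозначение, поэтому поле в БД TEXT
--         # Приходится отсеивать товары без размера, сравнивая со строкой
--         if item_size != '0':
--             items_text.append(
--                 "Отслеживание появления:\n"
--                 f"[{item_name}]({url})\n"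
--                 f"Артикул: {article}\n"
--                 f"Размер: {item_size}\n"
--                 f"ID товара: {item_id}\n"
--             )
--             continue
--         items_text.append(
--             "Отслеживание появления:\n"
--             f"[{item_name}]({url})\n"
--             f"Артикул: {article}\n"
--             f"ID товара: {item_id}\n"
--         )
--         continue
--     return items_text
-- ===== SOURCE B (Python) =====
-- def get_text_with_items(items):
--     """Same messages, built by conditional line assembly instead of four full templates."""
--     items_text = []
--     for item_id, article, item_size, item_name, url, existence, user_price in items:
--         lines = [
--             "Отслеживание цены:" if existence else "Отслеживание появления:",
--             f"[{item_name}]({url})",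
--             f"Артикул: {article}",
--         ]
--         if item_size != '0':
--             lines.append(f"Размер: {item_size}")
--         if existence:
--             lines.append(f"Ожидаемая цена: {user_price}")
--         lines.append(f"ID товара: {item_id}")
--         items_text.append("\n".join(lines) + "\n")
--     return items_text
-- ===== Notes on version B (the rewrite author's own statement) =====
-- stated objective: simpler
-- what changed: Replaces the four duplicated full message templates behind a two-level if/continue chain by one conditional line-list assembly joined with newlines, removing all duplication.
import Mathlib
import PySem

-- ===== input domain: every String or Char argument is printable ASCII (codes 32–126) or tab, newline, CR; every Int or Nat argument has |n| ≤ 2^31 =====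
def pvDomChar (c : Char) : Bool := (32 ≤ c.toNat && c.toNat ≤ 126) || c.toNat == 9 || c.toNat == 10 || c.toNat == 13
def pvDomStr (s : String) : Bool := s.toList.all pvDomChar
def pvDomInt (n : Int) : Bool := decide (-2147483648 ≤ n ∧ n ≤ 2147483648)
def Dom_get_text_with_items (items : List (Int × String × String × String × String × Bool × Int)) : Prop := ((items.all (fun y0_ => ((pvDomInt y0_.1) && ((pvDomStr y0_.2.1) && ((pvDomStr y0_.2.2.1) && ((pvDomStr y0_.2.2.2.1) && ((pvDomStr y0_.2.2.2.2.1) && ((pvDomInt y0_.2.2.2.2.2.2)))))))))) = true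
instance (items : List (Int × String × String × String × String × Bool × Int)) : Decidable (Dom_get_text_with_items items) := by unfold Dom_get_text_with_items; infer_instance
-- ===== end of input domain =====

-- Rewrite (one honest line): B assembles each message as a conditional list of lines joined by newlines,
-- replacing A's four duplicated full templates; same cost, less duplication.
-- ===== PORT A =====
def get_text_with_items (items : List (Int × String × String × String × String × Bool × Int)) : List String :=
  items.foldl (fun items_text it =>
    let (item_id, article, item_size, item_name, url, existence, user_price) := it
    if existence then
      if item_size != "0" then
        items_text ++ ["Отслеживание цены:\n" ++
          "[" ++ item_name ++ "](" ++ url ++ ")\n" ++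
          "Артикул: " ++ article ++ "\n" ++
          "Размер: " ++ item_size ++ "\n" ++
          "Ожидаемая цена: " ++ PySem.Int.toStr user_price ++ "\n" ++
          "ID товара: " ++ PySem.Int.toStr item_id ++ "\n"]
      else
        items_text ++ ["Отслеживание цены:\n" ++
          "[" ++ item_name ++ "](" ++ url ++ ")\n" ++
          "Артикул: " ++ article ++ "\n" ++
          "Ожидаемая цена: " ++ PySem.Int.toStr user_price ++ "\n" ++
          "ID товара: " ++ PySem.Int.toStr item_id ++ "\n"]
    else
      if item_size != "0" then
        items_text ++ ["Отслеживание появления:\n" ++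
          "[" ++ item_name ++ "](" ++ url ++ ")\n" ++
          "Артикул: " ++ article ++ "\n" ++
          "Размер: " ++ item_size ++ "\n" ++
          "ID товара: " ++ PySem.Int.toStr item_id ++ "\n"]
      else
        items_text ++ ["Отслеживание появления:\n" ++
          "[" ++ item_name ++ "](" ++ url ++ ")\n" ++
          "Артикул: " ++ article ++ "\n" ++
          "ID товара: " ++ PySem.Int.toStr item_id ++ "\n"]) []

-- ===== PORT B =====
def get_text_with_items_alt (items : List (Int × String × String × String × String × Bool × Int)) : List String :=
  items.foldl (fun items_text it =>
    let (item_id, article, item_size, item_name, url, existence, user_price) := it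
    let lines : List String :=
      [(if existence then "Отслеживание цены:" else "Отслеживание появления:"),
       "[" ++ item_name ++ "](" ++ url ++ ")",
       "Артикул: " ++ article]
    let lines := if item_size != "0" then lines ++ ["Размер: " ++ item_size] else lines
    let lines := if existence then lines ++ ["Ожидаемая цена: " ++ PySem.Int.toStr user_price] else lines
    let lines := lines ++ ["ID товара: " ++ PySem.Int.toStr item_id]
    items_text ++ [PySem.Str.join "\n" lines ++ "\n"]) []

-- ===== PRECONDITION & SPEC =====
def Spec_get_text_with_items (items : List (Int × String × String × String × String × Bool × Int)) (out : List String) : Prop := out = get_text_with_items_alt items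
instance (items : List (Int × String × String × String × String × Bool × Int)) (out : List String) : Decidable (Spec_get_text_with_items items out) := by unfold Spec_get_text_with_items; infer_instance

-- ===== CLAIM (what is proved, stated in full; the proofs are below) =====
def Claim_equal_get_text_with_items : Prop := ∀ (items : List (Int × String × String × String × String × Bool × Int)), Dom_get_text_with_items items → Spec_get_text_with_items items (get_text_with_items items)

-- ===== LEMMAS AND PROOFS =====

-- ===== VERDICT (by name: the statement is the Claim_ definition above) =====
theorem step_eq (it : Int × String × String × String × String × Bool × Int)
    (acc : List String) :
    (fun items_text it =>
      let (item_id, article, item_size, item_name, url, existence, user_price) := it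
      if existence then
        if item_size != "0" then
          items_text ++ ["Отслеживание цены:\n" ++
            "[" ++ item_name ++ "](" ++ url ++ ")\n" ++
            "Артикул: " ++ article ++ "\n" ++
            "Размер: " ++ item_size ++ "\n" ++
            "Ожидаемая цена: " ++ PySem.Int.toStr user_price ++ "\n" ++
            "ID товара: " ++ PySem.Int.toStr item_id ++ "\n"]
        else
          items_text ++ ["Отслеживание цены:\n" ++
            "[" ++ item_name ++ "](" ++ url ++ ")\n" ++
            "Артикул: " ++ article ++ "\n" ++
            "Ожидаемая цена: " ++ PySem.Int.toStr user_price ++ "\n" ++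
            "ID товара: " ++ PySem.Int.toStr item_id ++ "\n"]
      else
        if item_size != "0" then
          items_text ++ ["Отслеживание появления:\n" ++
            "[" ++ item_name ++ "](" ++ url ++ ")\n" ++
            "Артикул: " ++ article ++ "\n" ++
            "Размер: " ++ item_size ++ "\n" ++
            "ID товара: " ++ PySem.Int.toStr item_id ++ "\n"]
        else
          items_text ++ ["Отслеживание появления:\n" ++
            "[" ++ item_name ++ "](" ++ url ++ ")\n" ++
            "Артикул: " ++ article ++ "\n" ++
            "ID товара: " ++ PySem.Int.toStr item_id ++ "\n"]) acc it
    = (fun items_text it =>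
      let (item_id, article, item_size, item_name, url, existence, user_price) := it
      let lines : List String :=
        [(if existence then "Отслеживание цены:" else "Отслеживание появления:"),
         "[" ++ item_name ++ "](" ++ url ++ ")",
         "Артикул: " ++ article]
      let lines := if item_size != "0" then lines ++ ["Размер: " ++ item_size] else lines
      let lines := if existence then lines ++ ["Ожидаемая цена: " ++ PySem.Int.toStr user_price] else lines
      let lines := lines ++ ["ID товара: " ++ PySem.Int.toStr item_id]
      items_text ++ [PySem.Str.join "\n" lines ++ "\n"]) acc it := by
  obtain ⟨item_id, article, item_size, item_name, url, existence, user_price⟩ := it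
  cases existence <;> by_cases h : item_size != "0" <;>
    simp only [h, Bool.false_eq_true] <;>
    simp [PySem.Str.join, PySem.Chars.join, List.intercalate, List.intersperse, String.ext_iff, String.toList_append]

theorem get_text_with_items_spec : Claim_equal_get_text_with_items := by
  intro items _
  unfold Spec_get_text_with_items get_text_with_items get_text_with_items_alt
  congr 1
  funext acc it
  exact step_eq it acc
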